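-- pv_equiv track=rewrite | github.com/bhofmei/analysis-scripts | chip/metaplot_abs_chip_fr_pe.py | countRegion
-- ===== SOURCE A (Python) =====
-- def countRegion( bedDict, start, mid, stop, numBins, binWidth ):
--
-- 	upAr = [0] * numBins
-- 	downAr = [0] * numBins
-- 	if bedDict == None:
-- 		return -1
-- 	# upstream Ar
-- 	for bin in range( numBins ):
-- 		bStart = int(start + bin*binWidth)
-- 		# loop through each position
-- 		for pos in range(bStart, int(bStart+binWidth)):
-- 			dictEntry = bedDict.get( pos )
-- 			if dictEntry != None:
-- 				upAr[bin] += dictEntry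
--
-- 	# downstream Ar
-- 	for bin in range(numBins):
-- 		bStart = int(mid+1 + bin*binWidth)
-- 		for pos in range(bStart, int(bStart+binWidth)):
-- 			dictEntry = bedDict.get( pos )
-- 			if dictEntry != None:
-- 				downAr[bin] += dictEntry
-- 	outAr = upAr + downAr
-- 	return outAr
-- ===== SOURCE B (Python) =====
-- def countRegion( bedDict, start, mid, stop, numBins, binWidth ):
-- 	# One pass over the dict keys: each key is assigned to its bin arithmetically,
-- 	# instead of scanning every position of every bin.
-- 	upAr = [0] * numBins
-- 	downAr = [0] * numBins
-- 	if binWidth > 0: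
-- 		for pos in bedDict:
-- 			v = bedDict[pos]
-- 			b = (pos - start) // binWidth
-- 			if 0 <= b < numBins:
-- 				upAr[b] += v
-- 			b = (pos - (mid + 1)) // binWidth
-- 			if 0 <= b < numBins:
-- 				downAr[b] += v
-- 	return upAr + downAr
-- ===== Notes on version B (the rewrite author's own statement) =====
-- stated objective: faster
-- what changed: Instead of scanning every position of every bin (numBins*binWidth dict lookups per window), B makes one pass over the dict keys and assigns each key to its bin by floor division.
import Mathlib
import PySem

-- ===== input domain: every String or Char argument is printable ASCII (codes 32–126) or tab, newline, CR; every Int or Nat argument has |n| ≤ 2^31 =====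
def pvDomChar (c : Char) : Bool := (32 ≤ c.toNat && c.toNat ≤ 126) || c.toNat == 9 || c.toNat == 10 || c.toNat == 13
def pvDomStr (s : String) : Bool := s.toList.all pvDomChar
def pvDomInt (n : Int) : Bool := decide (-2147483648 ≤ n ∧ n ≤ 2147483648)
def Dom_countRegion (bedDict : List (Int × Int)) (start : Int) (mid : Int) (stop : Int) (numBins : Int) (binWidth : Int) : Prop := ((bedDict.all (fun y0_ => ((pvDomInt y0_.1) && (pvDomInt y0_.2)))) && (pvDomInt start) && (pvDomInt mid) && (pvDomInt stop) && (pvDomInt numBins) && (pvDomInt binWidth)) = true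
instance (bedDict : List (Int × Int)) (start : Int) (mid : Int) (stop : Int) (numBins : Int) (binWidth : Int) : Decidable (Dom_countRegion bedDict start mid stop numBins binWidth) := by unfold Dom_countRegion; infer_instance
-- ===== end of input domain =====

-- B replaces A's scan of every position of every bin by one pass over the dict keys,
-- assigning each key to its bin arithmetically (objective: faster).
-- (The 'bedDict == None' branch of A cannot fire for a dict-typed argument and is not ported.)

-- ===== PORT A =====
-- A: for each of the numBins bins of each window, loop over every position of the
-- bin and add bedDict.get(pos) when present.
def countRegion (bedDict : List (Int × Int)) (start : Int) (mid : Int) (stop : Int) (numBins : Int) (binWidth : Int) : List Int :=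
  let upAr0 : List Int := List.replicate numBins.toNat 0      -- [0] * numBins
  let downAr0 : List Int := List.replicate numBins.toNat 0    -- [0] * numBins
  let upAr := (PySem.List.pyRange 0 numBins 1).foldl (fun ar bin =>
      let bStart := start + bin * binWidth
      (PySem.List.pyRange bStart (bStart + binWidth) 1).foldl (fun ar2 pos =>
        match (PySem.Dict.mk bedDict).get? pos with
        | some v => PySem.List.pySetD ar2 bin (PySem.List.pyGetD ar2 bin 0 + v)  -- upAr[bin] += dictEntry
        | none => ar2) ar) upAr0
  let downAr := (PySem.List.pyRange 0 numBins 1).foldl (fun ar bin =>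
      let bStart := mid + 1 + bin * binWidth
      (PySem.List.pyRange bStart (bStart + binWidth) 1).foldl (fun ar2 pos =>
        match (PySem.Dict.mk bedDict).get? pos with
        | some v => PySem.List.pySetD ar2 bin (PySem.List.pyGetD ar2 bin 0 + v)  -- downAr[bin] += dictEntry
        | none => ar2) ar) downAr0
  upAr ++ downAr

-- ===== PORT B =====
-- B: one pass over the dict keys ('for pos in bedDict' iterates the distinct keys in
-- insertion order); each key is placed in its bin by floor division.
def countRegion_alt (bedDict : List (Int × Int)) (start : Int) (mid : Int) (stop : Int) (numBins : Int) (binWidth : Int) : List Int :=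
  let upAr0 : List Int := List.replicate numBins.toNat 0      -- [0] * numBins
  let downAr0 : List Int := List.replicate numBins.toNat 0    -- [0] * numBins
  let st :=
    if binWidth > 0 then
      (PySem.Set.ofList (bedDict.map Prod.fst)).foldl (fun st pos =>
        -- pos is a key of bedDict, so bedDict[pos] succeeds; getD is exact here
        let v := (PySem.Dict.mk bedDict).getD pos 0
        let b1 := PySem.Int.floordiv (pos - start) binWidth
        let st1 := if 0 ≤ b1 ∧ b1 < numBins then
            (PySem.List.pySetD st.1 b1 (PySem.List.pyGetD st.1 b1 0 + v), st.2)
          else st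
        let b2 := PySem.Int.floordiv (pos - (mid + 1)) binWidth
        if 0 ≤ b2 ∧ b2 < numBins then
          (st1.1, PySem.List.pySetD st1.2 b2 (PySem.List.pyGetD st1.2 b2 0 + v))
        else st1) (upAr0, downAr0)
    else (upAr0, downAr0)
  st.1 ++ st.2

-- ===== PRECONDITION & SPEC =====
def Spec_countRegion (bedDict : List (Int × Int)) (start : Int) (mid : Int) (stop : Int) (numBins : Int) (binWidth : Int) (out : List Int) : Prop := out = countRegion_alt bedDict start mid stop numBins binWidth
instance (bedDict : List (Int × Int)) (start : Int) (mid : Int) (stop : Int) (numBins : Int) (binWidth : Int) (out : List Int) : Decidable (Spec_countRegion bedDict start mid stop numBins binWidth out) := by unfold Spec_countRegion; infer_instance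

-- ===== CLAIM (what is proved, stated in full; the proofs are below) =====
def Claim_equal_countRegion : Prop := ∀ (bedDict : List (Int × Int)) (start : Int) (mid : Int) (stop : Int) (numBins : Int) (binWidth : Int), Dom_countRegion bedDict start mid stop numBins binWidth → Spec_countRegion bedDict start mid stop numBins binWidth (countRegion bedDict start mid stop numBins binWidth)

-- ===== LEMMAS AND PROOFS =====

-- the value bedDict holds at position p (0 if absent)
def pvM (d : List (Int × Int)) (p : Int) : Int := (PySem.Dict.mk d).getD p 0

-- the canonical step both loops reduce to: add w a into slot idx a
def pvStep (idx : Int → Nat) (w : Int → Int) (ar : List Int) (a : Int) : List Int :=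
  ar.set (idx a) (ar.getD (idx a) 0 + w a)

lemma pvStep_length (idx : Int → Nat) (w : Int → Int) (l : List Int) (ar : List Int) :
    (l.foldl (pvStep idx w) ar).length = ar.length := by
  induction l generalizing ar with
  | nil => rfl
  | cons a l ih => simp [List.foldl, ih, pvStep]

lemma getD_set_self (l : List Int) (i : Nat) (x : Int) (h : i < l.length) :
    (l.set i x).getD i 0 = x := by
  rw [List.getD_eq_getElem?_getD, List.getElem?_set_self (by simpa using h)]; rfl

lemma getD_set_ne (l : List Int) (i j : Nat) (x : Int) (h : i ≠ j) :
    (l.set i x).getD j 0 = l.getD j 0 := by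
  rw [List.getD_eq_getElem?_getD, List.getElem?_set_ne h, ← List.getD_eq_getElem?_getD]

lemma set_getD_self (l : List Int) (i : Nat) : l.set i (l.getD i 0) = l := by
  by_cases h : i < l.length
  · have : l.getD i 0 = l[i] := by
      rw [List.getD_eq_getElem?_getD, List.getElem?_eq_getElem h]; rfl
    rw [this, List.set_getElem_self]
  · exact List.set_eq_of_length_le (by omega)

lemma pvStep_getD (idx : Int → Nat) (w : Int → Int) (l : List Int) (ar : List Int)
    (i : Nat) (hi : i < ar.length) :
    (l.foldl (pvStep idx w) ar).getD i 0
      = ar.getD i 0 + ((l.filter (fun a => idx a == i)).map w).sum := by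
  induction l generalizing ar with
  | nil => simp
  | cons a l ih =>
    by_cases h : idx a = i
    · rw [List.foldl_cons, ih _ (by simp [pvStep, hi]),
        List.filter_cons_of_pos (by simpa using h)]
      simp only [pvStep, h, getD_set_self ar i _ hi, List.map_cons, List.sum_cons]
      ring
    · rw [List.foldl_cons, ih _ (by simp [pvStep, hi]),
        List.filter_cons_of_neg (by simpa using h)]
      simp only [pvStep, getD_set_ne ar (idx a) i _ h]

-- the inner position loop of A adds the window sum into slot j.toNat
lemma inner_fold (d : List (Int × Int)) (j : Int) (hj : 0 ≤ j) (l : List Int) (ar : List Int) :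
    (l.foldl (fun ar2 pos =>
        match (PySem.Dict.mk d).get? pos with
        | some v => PySem.List.pySetD ar2 j (PySem.List.pyGetD ar2 j 0 + v)
        | none => ar2) ar)
      = ar.set j.toNat (ar.getD j.toNat 0 + (l.map (pvM d)).sum) := by
  induction l generalizing ar with
  | nil =>
    simp only [List.foldl_nil, List.map_nil, List.sum_nil, add_zero]
    exact (set_getD_self ar j.toNat).symm
  | cons p l ih =>
    rcases hc : (PySem.Dict.mk d).get? p with _ | v
    · have hm : pvM d p = 0 := by simp [pvM, PySem.Dict.getD_eq_get?_getD, hc]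
      simp only [List.foldl_cons, hc, ih, List.map_cons, List.sum_cons, hm, zero_add]
    · have hm : pvM d p = v := by simp [pvM, PySem.Dict.getD_eq_get?_getD, hc]
      have hs : PySem.List.pySetD ar j (PySem.List.pyGetD ar j 0 + v)
          = ar.set j.toNat (ar.getD j.toNat 0 + v) := by
        rw [PySem.List.pySetD_of_nonneg ar _ hj]
        congr 1
        rw [PySem.List.pyGetD, PySem.List.pyGet?_of_nonneg ar hj,
          List.getD_eq_getElem?_getD]
      simp only [List.foldl_cons, hc]
      rw [hs, ih]
      by_cases h : j.toNat < ar.length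
      · rw [getD_set_self ar j.toNat _ h, List.set_set, List.map_cons, List.sum_cons, hm]
        ring_nf
      · have hid : ∀ y : Int, ar.set j.toNat y = ar := fun y => List.set_eq_of_length_le (by omega)
        rw [hid, hid, hid]

lemma pvFilterRange (n i : Nat) (h : i < n) :
    (List.range n).filter (fun k => k == i) = [i] := by
  induction n with
  | zero => omega
  | succ n ih =>
    rw [List.range_succ, List.filter_append]
    by_cases hi : i < n
    · rw [ih hi]
      have : n ≠ i := by omega
      simp [this]
    · have hni : i = n := by omega
      subst hni
      have h0 : (List.range i).filter (fun k => k == i) = [] := by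
        rw [List.filter_eq_nil_iff]
        intro a ha
        simp only [List.mem_range] at ha
        simp only [beq_iff_eq]
        omega
      simp [h0]

-- the outer bin loop from an all-zero array produces the table of per-bin values
lemma fold_range_map (w : Int → Int) (nB : Int) :
    (PySem.List.pyRange 0 nB 1).foldl (pvStep Int.toNat w) (List.replicate nB.toNat 0)
      = (List.range nB.toNat).map (fun i : Nat => w (i : Int)) := by
  have hlen : ((PySem.List.pyRange 0 nB 1).foldl (pvStep Int.toNat w) (List.replicate nB.toNat 0)).length = nB.toNat := by
    rw [pvStep_length]; simp
  apply List.ext_getElem (by simpa using hlen)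
  intro i h1 h2
  have hi : i < nB.toNat := by simpa using h2
  have hg := pvStep_getD Int.toNat w (PySem.List.pyRange 0 nB 1) (List.replicate nB.toNat 0) i (by simpa using hi)
  have hfl : (PySem.List.pyRange 0 nB 1).filter (fun a => a.toNat == i) = [(i : Int)] := by
    rw [PySem.List.pyRange_zero, List.filter_map]
    have hc : (List.range nB.toNat).filter ((fun (a : Int) => a.toNat == i) ∘ (fun k : Nat => (k : Int)))
        = (List.range nB.toNat).filter (fun k => k == i) := by
      apply List.filter_congr; intro x _; simp
    rw [hc, pvFilterRange _ _ hi]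
    rfl
  rw [hfl] at hg
  have hrep : (List.replicate nB.toNat (0 : Int)).getD i 0 = 0 := List.getD_replicate _ hi
  rw [hrep] at hg
  simp only [List.map_cons, List.map_nil, List.sum_cons, List.sum_nil, add_zero, zero_add] at hg
  rw [List.getD_eq_getElem?_getD, List.getElem?_eq_getElem h1] at hg
  rw [List.getElem_map, List.getElem_range]
  simpa using hg

-- A's per-window array
lemma A_array (d : List (Int × Int)) (base bw nB : Int) :
    (PySem.List.pyRange 0 nB 1).foldl (fun ar bin =>
        (PySem.List.pyRange (base + bin * bw) (base + bin * bw + bw) 1).foldl (fun ar2 pos =>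
          match (PySem.Dict.mk d).get? pos with
          | some v => PySem.List.pySetD ar2 bin (PySem.List.pyGetD ar2 bin 0 + v)
          | none => ar2) ar) (List.replicate nB.toNat 0)
      = (List.range nB.toNat).map (fun i : Nat =>
          ((PySem.List.pyRange (base + (i : Int) * bw) (base + (i : Int) * bw + bw) 1).map (pvM d)).sum) := by
  rw [← fold_range_map (fun bin => ((PySem.List.pyRange (base + bin * bw) (base + bin * bw + bw) 1).map (pvM d)).sum) nB]
  apply PySem.List.foldl_congr_mem'
  intro bin hbin ar
  have h0 : 0 ≤ bin := (PySem.List.mem_pyRange_one.mp hbin).1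
  exact inner_fold d bin h0 _ ar

lemma pvM_eq_zero (d : List (Int × Int)) (p : Int) (h : p ∉ d.map Prod.fst) : pvM d p = 0 := by
  cases hcb : (PySem.Dict.mk d).contains p with
  | false => exact PySem.Dict.getD_of_not_contains _ _ hcb
  | true =>
    exact absurd (by simpa [PySem.Dict.keys_mk] using
      (PySem.Dict.contains_iff_mem_keys (PySem.Dict.mk d) p).mp hcb) h

lemma pvSumFilterZero (l : List Int) (p : Int → Bool) (m : Int → Int)
    (h : ∀ x ∈ l, p x = false → m x = 0) : ((l.filter p).map m).sum = (l.map m).sum := by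
  induction l with
  | nil => simp
  | cons a l ih =>
    rw [List.filter_cons]
    cases hp : p a
    · simp only [Bool.false_eq_true, if_false, List.map_cons, List.sum_cons,
        h a (by simp) hp, zero_add]
      exact ih (fun x hx => h x (by simp [hx]))
    · simp only [if_true, List.map_cons, List.sum_cons]
      rw [ih (fun x hx => h x (by simp [hx]))]

-- sum of dict values over a window: keys filtered to the window vs every position
lemma window_sum (d : List (Int × Int)) (lo hi : Int) :
    (((PySem.Set.ofList (d.map Prod.fst)).filter (fun k => decide (lo ≤ k ∧ k < hi))).map (pvM d)).sum
      = ((PySem.List.pyRange lo hi 1).map (pvM d)).sum := by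
  have h1 : ((PySem.Set.ofList (d.map Prod.fst)).filter (fun k => decide (lo ≤ k ∧ k < hi))).Nodup :=
    List.Nodup.filter _ (PySem.Set.nodup_ofList _)
  have h2 : ((PySem.List.pyRange lo hi 1).filter (fun k => decide (k ∈ d.map Prod.fst))).Nodup :=
    List.Nodup.filter _ (PySem.List.nodup_pyRange_one lo hi)
  have hp : ((PySem.Set.ofList (d.map Prod.fst)).filter (fun k => decide (lo ≤ k ∧ k < hi))).Perm
      ((PySem.List.pyRange lo hi 1).filter (fun k => decide (k ∈ d.map Prod.fst))) := by
    rw [List.perm_ext_iff_of_nodup h1 h2]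
    intro x
    simp only [List.mem_filter, PySem.Set.mem_ofList, PySem.List.mem_pyRange_one, decide_eq_true_eq]
    tauto
  rw [(hp.map (pvM d)).sum_eq]
  apply pvSumFilterZero
  intro x _ hx
  apply pvM_eq_zero
  simpa using hx

-- B's key loop for one window, as a named function
def pvFB (d : List (Int × Int)) (nB bw base : Int) (ar : List Int) (k : Int) : List Int :=
  if 0 ≤ PySem.Int.floordiv (k - base) bw ∧ PySem.Int.floordiv (k - base) bw < nB then
    PySem.List.pySetD ar (PySem.Int.floordiv (k - base) bw)
      (PySem.List.pyGetD ar (PySem.Int.floordiv (k - base) bw) 0 + pvM d k)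
  else ar

lemma bool_eq_of_iff {a b : Bool} (h : a = true ↔ b = true) : a = b := by
  cases a <;> cases b <;> simp_all

-- B's per-window array (bw > 0)
lemma B_array (d : List (Int × Int)) (base bw nB : Int) (hbw : 0 < bw) :
    (PySem.Set.ofList (d.map Prod.fst)).foldl (pvFB d nB bw base) (List.replicate nB.toNat 0)
      = (List.range nB.toNat).map (fun i : Nat =>
          ((PySem.List.pyRange (base + (i : Int) * bw) (base + (i : Int) * bw + bw) 1).map (pvM d)).sum) := by
  have hstep : (PySem.Set.ofList (d.map Prod.fst)).foldl (pvFB d nB bw base) (List.replicate nB.toNat 0)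
      = ((PySem.Set.ofList (d.map Prod.fst)).filter
          (fun k => decide (0 ≤ PySem.Int.floordiv (k - base) bw ∧ PySem.Int.floordiv (k - base) bw < nB))).foldl
          (pvStep (fun k => (PySem.Int.floordiv (k - base) bw).toNat) (pvM d)) (List.replicate nB.toNat 0) := by
    unfold pvFB
    rw [PySem.List.foldl_ite_eq_foldl_filter
      (fun k => 0 ≤ PySem.Int.floordiv (k - base) bw ∧ PySem.Int.floordiv (k - base) bw < nB)]
    apply PySem.List.foldl_congr_mem'
    intro k hk ar
    have h0 : 0 ≤ PySem.Int.floordiv (k - base) bw := by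
      have := List.of_mem_filter hk
      simp only [decide_eq_true_eq] at this
      exact this.1
    simp only [pvStep]
    rw [PySem.List.pySetD_of_nonneg ar _ h0]
    congr 1
    rw [PySem.List.pyGetD, PySem.List.pyGet?_of_nonneg ar h0, List.getD_eq_getElem?_getD]
  rw [hstep]
  have hlen : (((PySem.Set.ofList (d.map Prod.fst)).filter
      (fun k => decide (0 ≤ PySem.Int.floordiv (k - base) bw ∧ PySem.Int.floordiv (k - base) bw < nB))).foldl
      (pvStep (fun k => (PySem.Int.floordiv (k - base) bw).toNat) (pvM d)) (List.replicate nB.toNat 0)).length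
      = nB.toNat := by
    rw [pvStep_length]; simp
  apply List.ext_getElem (by simpa using hlen)
  intro i h1 h2
  have hi : i < nB.toNat := by simpa using h2
  have hg := pvStep_getD (fun k => (PySem.Int.floordiv (k - base) bw).toNat) (pvM d)
    ((PySem.Set.ofList (d.map Prod.fst)).filter
      (fun k => decide (0 ≤ PySem.Int.floordiv (k - base) bw ∧ PySem.Int.floordiv (k - base) bw < nB)))
    (List.replicate nB.toNat 0) i (by simpa using hi)
  rw [List.filter_filter] at hg
  have hfc : ((PySem.Set.ofList (d.map Prod.fst)).filter
      (fun a => ((PySem.Int.floordiv (a - base) bw).toNat == i) &&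
        decide (0 ≤ PySem.Int.floordiv (a - base) bw ∧ PySem.Int.floordiv (a - base) bw < nB)))
      = ((PySem.Set.ofList (d.map Prod.fst)).filter
          (fun k => decide (base + (i : Int) * bw ≤ k ∧ k < base + (i : Int) * bw + bw))) := by
    apply List.filter_congr
    intro k _
    apply bool_eq_of_iff
    simp only [Bool.and_eq_true, beq_iff_eq, decide_eq_true_eq]
    have hexp : ((i : Int) + 1) * bw = (i : Int) * bw + bw := by ring
    constructor
    · rintro ⟨hti, h0, _⟩
      have hq : PySem.Int.floordiv (k - base) bw = (i : Int) := by omega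
      obtain ⟨ha, hb⟩ := (PySem.Int.floordiv_eq_iff_of_pos hbw).mp hq
      rw [hexp] at hb
      constructor <;> linarith
    · rintro ⟨ha, hb⟩
      have hq : PySem.Int.floordiv (k - base) bw = (i : Int) := by
        rw [PySem.Int.floordiv_eq_iff_of_pos hbw, hexp]
        constructor <;> linarith
      refine ⟨by omega, by omega, by omega⟩
  rw [hfc] at hg
  rw [window_sum d (base + (i : Int) * bw) (base + (i : Int) * bw + bw)] at hg
  have hrep : (List.replicate nB.toNat (0 : Int)).getD i 0 = 0 := List.getD_replicate _ hi
  rw [hrep, zero_add] at hg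
  rw [List.getD_eq_getElem?_getD, List.getElem?_eq_getElem h1] at hg
  rw [List.getElem_map, List.getElem_range]
  simpa using hg

-- A's bin loop does nothing when binWidth <= 0 (every position range is empty)
lemma A_outer_nil (d : List (Int × Int)) (base bw nB : Int) (hbw : bw ≤ 0) (init : List Int) :
    (PySem.List.pyRange 0 nB 1).foldl (fun ar bin =>
        (PySem.List.pyRange (base + bin * bw) (base + bin * bw + bw) 1).foldl (fun ar2 pos =>
          match (PySem.Dict.mk d).get? pos with
          | some v => PySem.List.pySetD ar2 bin (PySem.List.pyGetD ar2 bin 0 + v)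
          | none => ar2) ar) init = init := by
  have h : ∀ bin ∈ PySem.List.pyRange 0 nB 1, ∀ ar : List Int,
      (PySem.List.pyRange (base + bin * bw) (base + bin * bw + bw) 1).foldl (fun ar2 pos =>
          match (PySem.Dict.mk d).get? pos with
          | some v => PySem.List.pySetD ar2 bin (PySem.List.pyGetD ar2 bin 0 + v)
          | none => ar2) ar = ar := by
    intro bin _ ar
    rw [PySem.List.pyRange_one_eq_nil (by linarith)]
    rfl
  calc (PySem.List.pyRange 0 nB 1).foldl _ init
      = (PySem.List.pyRange 0 nB 1).foldl (fun acc _ => acc) init :=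
        PySem.List.foldl_congr_mem' _ _ _ _ h
    _ = init := PySem.List.foldl_ignore _ _

-- B's single key loop over the pair of arrays is the pair of two independent loops
lemma B_pair (d : List (Int × Int)) (start mid nB bw : Int) (l : List Int) (st : List Int × List Int) :
    l.foldl (fun st pos =>
        let v := (PySem.Dict.mk d).getD pos 0
        let b1 := PySem.Int.floordiv (pos - start) bw
        let st1 := if 0 ≤ b1 ∧ b1 < nB then
            (PySem.List.pySetD st.1 b1 (PySem.List.pyGetD st.1 b1 0 + v), st.2)
          else st
        let b2 := PySem.Int.floordiv (pos - (mid + 1)) bw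
        if 0 ≤ b2 ∧ b2 < nB then
          (st1.1, PySem.List.pySetD st1.2 b2 (PySem.List.pyGetD st1.2 b2 0 + v))
        else st1) st
    = (l.foldl (pvFB d nB bw start) st.1, l.foldl (pvFB d nB bw (mid + 1)) st.2) := by
  induction l generalizing st with
  | nil => rfl
  | cons p l ih =>
    have hstep : (let v := (PySem.Dict.mk d).getD p 0
        let b1 := PySem.Int.floordiv (p - start) bw
        let st1 := if 0 ≤ b1 ∧ b1 < nB then
            (PySem.List.pySetD st.1 b1 (PySem.List.pyGetD st.1 b1 0 + v), st.2)
          else st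
        let b2 := PySem.Int.floordiv (p - (mid + 1)) bw
        if 0 ≤ b2 ∧ b2 < nB then
          (st1.1, PySem.List.pySetD st1.2 b2 (PySem.List.pyGetD st1.2 b2 0 + v))
        else st1)
        = (pvFB d nB bw start st.1 p, pvFB d nB bw (mid + 1) st.2 p) := by
      unfold pvFB pvM
      dsimp only
      split_ifs <;> rfl
    rw [List.foldl_cons, hstep, ih, List.foldl_cons, List.foldl_cons]

-- ===== VERDICT (by name: the statement is the Claim_ definition above) =====
theorem countRegion_spec : Claim_equal_countRegion := by
  intro d start mid stop nB bw _
  show (PySem.List.pyRange 0 nB 1).foldl (fun ar bin =>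
        (PySem.List.pyRange (start + bin * bw) (start + bin * bw + bw) 1).foldl (fun ar2 pos =>
          match (PySem.Dict.mk d).get? pos with
          | some v => PySem.List.pySetD ar2 bin (PySem.List.pyGetD ar2 bin 0 + v)
          | none => ar2) ar) (List.replicate nB.toNat 0)
      ++ (PySem.List.pyRange 0 nB 1).foldl (fun ar bin =>
        (PySem.List.pyRange (mid + 1 + bin * bw) (mid + 1 + bin * bw + bw) 1).foldl (fun ar2 pos =>
          match (PySem.Dict.mk d).get? pos with
          | some v => PySem.List.pySetD ar2 bin (PySem.List.pyGetD ar2 bin 0 + v)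
          | none => ar2) ar) (List.replicate nB.toNat 0)
    = (if bw > 0 then
        (PySem.Set.ofList (d.map Prod.fst)).foldl (fun st pos =>
          let v := (PySem.Dict.mk d).getD pos 0
          let b1 := PySem.Int.floordiv (pos - start) bw
          let st1 := if 0 ≤ b1 ∧ b1 < nB then
              (PySem.List.pySetD st.1 b1 (PySem.List.pyGetD st.1 b1 0 + v), st.2)
            else st
          let b2 := PySem.Int.floordiv (pos - (mid + 1)) bw
          if 0 ≤ b2 ∧ b2 < nB then
            (st1.1, PySem.List.pySetD st1.2 b2 (PySem.List.pyGetD st1.2 b2 0 + v))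
          else st1) (List.replicate nB.toNat 0, List.replicate nB.toNat 0)
      else (List.replicate nB.toNat 0, List.replicate nB.toNat 0)).1
      ++ (if bw > 0 then
        (PySem.Set.ofList (d.map Prod.fst)).foldl (fun st pos =>
          let v := (PySem.Dict.mk d).getD pos 0
          let b1 := PySem.Int.floordiv (pos - start) bw
          let st1 := if 0 ≤ b1 ∧ b1 < nB then
              (PySem.List.pySetD st.1 b1 (PySem.List.pyGetD st.1 b1 0 + v), st.2)
            else st
          let b2 := PySem.Int.floordiv (pos - (mid + 1)) bw
          if 0 ≤ b2 ∧ b2 < nB then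
            (st1.1, PySem.List.pySetD st1.2 b2 (PySem.List.pyGetD st1.2 b2 0 + v))
          else st1) (List.replicate nB.toNat 0, List.replicate nB.toNat 0)
      else (List.replicate nB.toNat 0, List.replicate nB.toNat 0)).2
  by_cases hbw : bw > 0
  · rw [if_pos hbw, B_pair, A_array, A_array, B_array d start bw nB hbw,
      B_array d (mid + 1) bw nB hbw]
  · rw [if_neg hbw,
      A_outer_nil d start bw nB (by omega) _, A_outer_nil d (mid + 1) bw nB (by omega) _]
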